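-- pv_equiv track=rewrite | github.com/rzaccagnino/icfl2sa | factorizations.py | find_bre
-- ===== SOURCE A (Python) =====
-- def find_bre(pre_pair):
--     w = pre_pair[0]
--     v = pre_pair[1]
--
--     #if v == '' and w.find('$') >= 0:
--     if v == '' and w.find(chr(200)) >= 0:
--         return (w, '', '', 0)
--     else:
--         n = len(w) - 1
--
--         f = border(w[:n])
--
--         i = n
--         last = f[i-1]
--
--         while i > 0:
--             if w[f[i-1]] < w[n]:
--                 last = f[i-1]
--             i = f[i-1]
--
--         return (w[:n - last], w[n - last:n + 1], v, last)
--
-- def border(p):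
--     l = len(p)
--     pi = [0]
--     k = 0
--     for i in range(1, l):
--         while (k > 0 and p[k] != p[i]):
--             k = pi[k-1]
--         if (p[k] == p[i]):
--             pi.append(k +1)
--             k = k + 1
--         else:
--             pi.append(k)
--
--     return pi
-- ===== SOURCE B (Python) =====
-- def find_bre(pre_pair):
--     w = pre_pair[0]
--     v = pre_pair[1]
--
--     if v == '' and w.find(chr(200)) >= 0:
--         return (w, '', '', 0)
--
--     n = len(w) - 1
--     # all proper border lengths of w[:n], in descending order (0 included when n >= 1)
--     borders = [L for L in range(n - 1, -1, -1) if w[:L] == w[n - L:n]]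
--     last = borders[0] if borders else 0
--     for L in borders:
--         if w[L] < w[n]:
--             last = L
--     return (w[:n - last], w[n - last:n + 1], v, last)
-- ===== Notes on version B (the rewrite author's own statement) =====
-- stated objective: simpler
-- what changed: Replaces the KMP prefix-function table plus failure-chain walk with a direct descending enumeration of the borders of w[:n] by prefix/suffix comparison, folding the same update over that list.
import Mathlib
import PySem

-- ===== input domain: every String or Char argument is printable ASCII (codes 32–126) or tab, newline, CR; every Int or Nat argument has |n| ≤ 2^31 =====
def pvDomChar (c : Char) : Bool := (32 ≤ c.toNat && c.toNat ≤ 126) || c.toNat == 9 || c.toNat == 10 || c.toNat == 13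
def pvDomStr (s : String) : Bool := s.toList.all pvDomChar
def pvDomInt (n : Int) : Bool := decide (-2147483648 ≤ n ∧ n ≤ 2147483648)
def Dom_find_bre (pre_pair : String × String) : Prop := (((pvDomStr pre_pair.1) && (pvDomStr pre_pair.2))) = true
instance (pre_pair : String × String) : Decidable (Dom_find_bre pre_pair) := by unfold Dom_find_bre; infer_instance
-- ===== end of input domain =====

-- B replaces A's KMP prefix-function table and failure-chain walk by a direct descending
-- enumeration of the borders of w[:n] (objective: simpler; same return value on all w ≠ '').

-- ===== PORT A =====
-- inner 'while k > 0 and p[k] != p[i]' of border; k strictly decreases on every reachable state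
-- (pi[j] ≤ j there), so fuel = p.length bounds the iteration count
def borderWhile (p : List Char) (pi : List Int) (i : Nat) : Int → Nat → Int
  | k, 0 => k
  | k, fuel+1 =>
    if 0 < k ∧ PySem.List.pyGet? p k ≠ PySem.List.pyGet? p (i : Int) then
      borderWhile p pi i ((PySem.List.pyGet? pi (k - 1)).getD 0) fuel  -- k = pi[k-1]; in range on every reachable state
    else k

-- one iteration of border's 'for i in range(1, l)'
def borderStep (p : List Char) (st : List Int × Int) (i : Nat) : List Int × Int :=
  let k := borderWhile p st.1 i st.2 p.length
  if PySem.List.pyGet? p k = PySem.List.pyGet? p (i : Int) then (st.1 ++ [k + 1], k + 1)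
  else (st.1 ++ [k], k)

def border (p : List Char) : List Int :=
  ((List.range' 1 (p.length - 1)).foldl (borderStep p) ([0], 0)).1

-- 'while i > 0' of find_bre; i strictly decreases on every reachable state, so fuel = w.length bounds it
def fbWhile (w : List Char) (f : List Int) (n : Int) : Int → Int → Nat → Int
  | _, last, 0 => last
  | i, last, fuel+1 =>
    if 0 < i then
      let fi := (PySem.List.pyGet? f (i - 1)).getD 0          -- f[i-1]; in range on every reachable state
      -- 'if w[f[i-1]] < w[n]: last = f[i-1]'; both indexes in range on every reachable state
      let last' := if (PySem.List.pyGet? w fi).getD 'a' < (PySem.List.pyGet? w n).getD 'a' then fi else last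
      fbWhile w f n fi last' fuel
    else last

def find_bre (pre_pair : String × String) : String × String × String × Int :=
  let w := pre_pair.1.toList
  let v := pre_pair.2
  if v = "" ∧ PySem.Chars.find w [Char.ofNat 200] ≥ 0 then (pre_pair.1, "", "", 0)
  else
    let n : Int := (w.length : Int) - 1
    let f := border (PySem.List.slice w none (some n))        -- f = border(w[:n])
    let last0 := (PySem.List.pyGet? f (n - 1)).getD 0         -- last = f[i-1] at i = n; none exactly when w = '' (IndexError, outside Pre_)
    let last := fbWhile w f n n last0 w.length
    (String.ofList (PySem.List.slice w none (some (n - last))),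
     String.ofList (PySem.List.slice w (some (n - last)) (some (n + 1))), v, last)

-- ===== PORT B =====
def find_bre_alt (pre_pair : String × String) : String × String × String × Int :=
  let w := pre_pair.1.toList
  let v := pre_pair.2
  if v = "" ∧ PySem.Chars.find w [Char.ofNat 200] ≥ 0 then (pre_pair.1, "", "", 0)
  else
    let n : Int := (w.length : Int) - 1
    -- borders = [L for L in range(n-1, -1, -1) if w[:L] == w[n-L:n]]
    let borders := (PySem.List.pyRange (n - 1) (-1) (-1)).filter
      (fun L => PySem.List.slice w none (some L) == PySem.List.slice w (some (n - L)) (some n))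
    -- last = borders[0] if borders else 0; then the update loop
    let last := borders.foldl
      (fun last L => if (PySem.List.pyGet? w L).getD 'a' < (PySem.List.pyGet? w n).getD 'a' then L else last)
      (borders.head?.getD 0)
    (String.ofList (PySem.List.slice w none (some (n - last))),
     String.ofList (PySem.List.slice w (some (n - last)) (some (n + 1))), v, last)

-- ===== PRECONDITION & SPEC =====
-- Pre_ excludes only w = '' , on which A raises IndexError (f[-2] into the one-element prefix table)
def Pre_find_bre (pre_pair : String × String) : Prop := pre_pair.1 ≠ ""
instance (pre_pair : String × String) : Decidable (Pre_find_bre pre_pair) := by unfold Pre_find_bre; infer_instance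
def pvWitness_find_bre : (String × String) := ("abab", "x")

def Spec_find_bre (pre_pair : String × String) (out : String × String × String × Int) : Prop := out = find_bre_alt pre_pair
instance (pre_pair : String × String) (out : String × String × String × Int) : Decidable (Spec_find_bre pre_pair out) := by unfold Spec_find_bre; infer_instance

-- ===== CLAIM (what is proved, stated in full; the proofs are below) =====
def Claim_equal_find_bre : Prop := ∀ (pre_pair : String × String), Dom_find_bre pre_pair → Pre_find_bre pre_pair → Spec_find_bre pre_pair (find_bre pre_pair)

-- ===== LEMMAS AND PROOFS =====

-- L is a border length of u (u[:L] is also a suffix of u; L = u.length allowed, excluded where needed)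
def pvIsB (u : List Char) (L : Nat) : Prop := L ≤ u.length ∧ u.take L <:+ u

-- length of the longest PROPER border of u
def pvMb (u : List Char) : Nat := Nat.findGreatest (fun L => u.take L <:+ u) (u.length - 1)

theorem pvMb_le (u : List Char) : pvMb u ≤ u.length - 1 := by unfold pvMb; exact Nat.findGreatest_le _

theorem pvMb_isB (u : List Char) : pvIsB u (pvMb u) := by
  refine ⟨by have := pvMb_le u; omega, ?_⟩
  unfold pvMb
  exact Nat.findGreatest_spec (P := fun L => u.take L <:+ u) (Nat.zero_le _) (show u.take 0 <:+ u by simp)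

theorem pvMb_max (u : List Char) (L : Nat) (hL : L ≤ u.length - 1) (h : u.take L <:+ u) :
    L ≤ pvMb u := by unfold pvMb; exact Nat.le_findGreatest hL h

theorem pvMb_take_lt (l : List Char) (i : Nat) (h : 0 < i) : pvMb (l.take i) < i := by
  have h1 := pvMb_le (l.take i)
  simp at h1
  omega

-- the failure chain visited by A's 'while i > 0' loop
def pvVisits (l : List Char) (i : Nat) : List Nat :=
  if h : 0 < i then pvMb (l.take i) :: pvVisits l (pvMb (l.take i)) else []
  termination_by i
  decreasing_by exact pvMb_take_lt l i h

theorem pvIsB_trans (u : List Char) (L1 L2 : Nat) (h1 : pvIsB u L1) (h2 : pvIsB (u.take L1) L2) :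
    pvIsB u L2 := by
  obtain ⟨hl1, hs1⟩ := h1
  obtain ⟨hl2, hs2⟩ := h2
  simp [Nat.min_eq_left hl1] at hl2
  refine ⟨le_trans hl2 hl1, ?_⟩
  rw [List.take_take, Nat.min_eq_left hl2] at hs2
  exact hs2.trans hs1

theorem pvIsB_of_le (u : List Char) (L b : Nat) (hL : pvIsB u L) (hb : pvIsB u b) (h : L ≤ b) :
    pvIsB (u.take b) L := by
  obtain ⟨hl1, hs1⟩ := hL
  obtain ⟨hl2, hs2⟩ := hb
  refine ⟨by simp; omega, ?_⟩
  rw [List.take_take, Nat.min_eq_left h]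
  exact List.suffix_of_suffix_length_le hs1 hs2 (by simp; omega)

theorem pv_append_singleton_suffix (a b : List Char) (x y : Char) :
    (a ++ [x]) <:+ (b ++ [y]) ↔ x = y ∧ a <:+ b := by
  rw [← List.reverse_prefix]
  simp [List.cons_prefix_cons]

-- membership in the failure chain = proper border of l.take i
theorem pv_mem_visits (l : List Char) (i : Nat) (hi : i ≤ l.length) (L : Nat) :
    L ∈ pvVisits l i ↔ L < i ∧ pvIsB (l.take i) L := by
  induction i using Nat.strong_induction_on with
  | _ i ih =>
    rw [pvVisits]
    by_cases h : 0 < i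
    · simp only [dif_pos h, List.mem_cons]
      have hbi : pvMb (l.take i) < i := pvMb_take_lt l i h
      have hbB : pvIsB (l.take i) (pvMb (l.take i)) := pvMb_isB (l.take i)
      have hb_len : pvMb (l.take i) ≤ l.length := le_trans (le_of_lt hbi) hi
      have htt : (l.take i).take (pvMb (l.take i)) = l.take (pvMb (l.take i)) := by
        rw [List.take_take, Nat.min_eq_left (le_of_lt hbi)]
      constructor
      · rintro (rfl | hmem)
        · exact ⟨hbi, hbB⟩
        · have hm := (ih (pvMb (l.take i)) hbi hb_len).mp hmem
          refine ⟨lt_trans hm.1 hbi, ?_⟩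
          exact pvIsB_trans (l.take i) (pvMb (l.take i)) L hbB (htt ▸ hm.2)
      · rintro ⟨hLi, hLB⟩
        have hLb : L ≤ pvMb (l.take i) := by
          apply pvMb_max (l.take i) L _ hLB.2
          have : (l.take i).length = i := by simp [Nat.min_eq_left hi]
          omega
        rcases eq_or_lt_of_le hLb with rfl | hlt
        · exact Or.inl rfl
        · refine Or.inr ((ih (pvMb (l.take i)) hbi hb_len).mpr ⟨hlt, ?_⟩)
          exact htt ▸ pvIsB_of_le (l.take i) L (pvMb (l.take i)) hLB hbB hLb
    · simp [h]
      omega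

theorem pvVisits_pairwise (l : List Char) (i : Nat) (hi : i ≤ l.length) :
    (pvVisits l i).Pairwise (· > ·) := by
  induction i using Nat.strong_induction_on with
  | _ i ih =>
    rw [pvVisits]
    by_cases h : 0 < i
    · simp only [dif_pos h]
      have hbi : pvMb (l.take i) < i := pvMb_take_lt l i h
      have hb_len : pvMb (l.take i) ≤ l.length := le_trans (le_of_lt hbi) hi
      exact List.Pairwise.cons
        (fun x hx => ((pv_mem_visits l (pvMb (l.take i)) hb_len x).mp hx).1)
        (ih (pvMb (l.take i)) hbi hb_len)
    · simp [h]

-- Nat-level model of border's inner while loop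
def pvKstar (p : List Char) (c : Char) (k : Nat) : Nat :=
  if h : 0 < k ∧ p.getD k 'a' ≠ c then pvKstar p c (pvMb (p.take k)) else k
  termination_by k
  decreasing_by exact pvMb_take_lt p k h.1

-- the prefix-function table as a list of Ints
def pvPI (p : List Char) (m : Nat) : List Int :=
  (List.range m).map (fun j => (pvMb (p.take (j+1)) : Int))

-- the common Nat-level update fold shared by both ports
def pvFold (l : List Char) (n : Nat) (xs : List Nat) (init : Int) : Int :=
  xs.foldl (fun last L => if l.getD L 'a' < l.getD n 'a' then (L : Int) else last) init

-- border-extension step: L ≥ 1 is a border of p[:i+1] iff L-1 is a border of p[:i] and p[L-1] = p[i]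
theorem pv_step_iff (p : List Char) (i L : Nat) (hi : i < p.length) (hL1 : 1 ≤ L) (hL2 : L ≤ i) :
    ((p.take (i+1)).take L <:+ p.take (i+1)) ↔
      ((p.take i).take (L-1) <:+ p.take i) ∧ p.getD (L-1) 'a' = p.getD i 'a' := by
  have e1 : p.take (i+1) = p.take i ++ [p[i]'hi] := List.take_succ_eq_append_getElem hi
  have hL1' : L - 1 < p.length := by omega
  have e2 : p.take L = p.take (L-1) ++ [p[L-1]'hL1'] := by
    have := List.take_succ_eq_append_getElem hL1'
    rwa [Nat.sub_add_cancel hL1] at this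
  have e3 : (p.take (i+1)).take L = p.take L := by
    rw [List.take_take, Nat.min_eq_left (by omega)]
  have e4 : (p.take i).take (L-1) = p.take (L-1) := by
    rw [List.take_take, Nat.min_eq_left (by omega)]
  rw [e3, e2, e1, e4, pv_append_singleton_suffix]
  have g1 : p.getD (L-1) 'a' = p[L-1]'hL1' := List.getD_eq_getElem p 'a' hL1'
  have g2 : p.getD i 'a' = p[i]'hi := List.getD_eq_getElem p 'a' hi
  rw [g1, g2]
  tauto

theorem pv_pyGet_eq_iff (p : List Char) (a b : Nat) (ha : a < p.length) (hb : b < p.length) :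
    (PySem.List.pyGet? p (a : Int) = PySem.List.pyGet? p (b : Int)) ↔ (p.getD a 'a' = p.getD b 'a') := by
  rw [PySem.List.pyGet?_natCast, PySem.List.pyGet?_natCast, List.getElem?_eq_getElem ha,
    List.getElem?_eq_getElem hb, List.getD_eq_getElem p 'a' ha, List.getD_eq_getElem p 'a' hb]
  simp

theorem pvKstar_spec (p : List Char) (i : Nat) (hi : i < p.length) (k : Nat)
    (hk : k < i) (hkB : pvIsB (p.take i) k)
    (hmax : ∀ L, L < i → pvIsB (p.take i) L → p.getD L 'a' = p.getD i 'a' → L ≤ k) :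
    pvKstar p (p.getD i 'a') k < i ∧ pvIsB (p.take i) (pvKstar p (p.getD i 'a') k) ∧
    (pvKstar p (p.getD i 'a') k = 0 ∨ p.getD (pvKstar p (p.getD i 'a') k) 'a' = p.getD i 'a') ∧
    (∀ L, L < i → pvIsB (p.take i) L → p.getD L 'a' = p.getD i 'a' → L ≤ pvKstar p (p.getD i 'a') k) := by
  induction k using Nat.strong_induction_on with
  | _ k ih =>
    rw [pvKstar]
    by_cases h : 0 < k ∧ p.getD k 'a' ≠ p.getD i 'a'
    · simp only [dif_pos h]
      have hbk : pvMb (p.take k) < k := pvMb_take_lt p k h.1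
      have htt : (p.take i).take k = p.take k := by
        rw [List.take_take, Nat.min_eq_left (le_of_lt hk)]
      have hmb : pvIsB (p.take i) (pvMb (p.take k)) := by
        apply pvIsB_trans (p.take i) k _ hkB
        rw [htt]
        exact pvMb_isB (p.take k)
      apply ih (pvMb (p.take k)) hbk (lt_trans hbk hk) hmb
      intro L hLi hLB hLc
      have hLk : L ≤ k := hmax L hLi hLB hLc
      have hLk' : L < k := by
        rcases eq_or_lt_of_le hLk with rfl | h'
        · exact absurd hLc h.2
        · exact h'
      have hLB' : pvIsB (p.take k) L := by
        have := pvIsB_of_le (p.take i) L k hLB hkB hLk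
        rwa [htt] at this
      apply pvMb_max (p.take k) L _ hLB'.2
      have : (p.take k).length = k := by simp; omega
      omega
    · simp only [dif_neg h]
      push Not at h
      refine ⟨hk, hkB, ?_, hmax⟩
      by_cases h0 : 0 < k
      · exact Or.inr (h h0)
      · exact Or.inl (by omega)

theorem pvMb_succ (p : List Char) (i : Nat) (hi : i < p.length) (hi1 : 1 ≤ i) :
    pvMb (p.take (i+1)) =
      (if p.getD (pvKstar p (p.getD i 'a') (pvMb (p.take i))) 'a' = p.getD i 'a'
       then pvKstar p (p.getD i 'a') (pvMb (p.take i)) + 1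
       else pvKstar p (p.getD i 'a') (pvMb (p.take i))) := by
  have hlen_i : (p.take i).length = i := by simp; omega
  have hlen_i1 : (p.take (i+1)).length = i+1 := by simp; omega
  have hk0 : pvMb (p.take i) < i := pvMb_take_lt p i (by omega)
  obtain ⟨hKi, hKB, hK0c, hKmax⟩ := pvKstar_spec p i hi (pvMb (p.take i)) hk0 (pvMb_isB (p.take i))
    (fun L hL hB _ => pvMb_max (p.take i) L (by omega) hB.2)
  have hMB : pvIsB (p.take (i+1)) (pvMb (p.take (i+1))) := pvMb_isB _
  have hMle : pvMb (p.take (i+1)) ≤ i := by have := pvMb_le (p.take (i+1)); omega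
  split_ifs with hc
  · apply le_antisymm
    · rcases Nat.eq_zero_or_pos (pvMb (p.take (i+1))) with h0 | h1
      · omega
      · have hstep := (pv_step_iff p i (pvMb (p.take (i+1))) hi h1 hMle).mp hMB.2
        have := hKmax (pvMb (p.take (i+1)) - 1) (by omega) ⟨by omega, hstep.1⟩ hstep.2
        omega
    · apply pvMb_max _ (pvKstar p (p.getD i 'a') (pvMb (p.take i)) + 1) (by omega)
      apply (pv_step_iff p i _ hi (by omega) (by omega)).mpr
      exact ⟨by simpa using hKB.2, by simpa using hc⟩
  · have hK : pvKstar p (p.getD i 'a') (pvMb (p.take i)) = 0 := by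
      rcases hK0c with h | h
      · exact h
      · exact absurd h hc
    rcases Nat.eq_zero_or_pos (pvMb (p.take (i+1))) with h0 | h1
    · omega
    · exfalso
      have hstep := (pv_step_iff p i (pvMb (p.take (i+1))) hi h1 hMle).mp hMB.2
      have hle := hKmax (pvMb (p.take (i+1)) - 1) (by omega) ⟨by omega, hstep.1⟩ hstep.2
      rw [hK] at hle
      have hM1 : pvMb (p.take (i+1)) = 1 := by omega
      apply hc
      rw [hK]
      rw [hM1] at hstep
      simpa using hstep.2

theorem borderWhile_eq (p : List Char) (i : Nat) (hi : i < p.length) :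
    ∀ (k : Nat), k < i → ∀ fuel, k ≤ fuel →
    borderWhile p (pvPI p i) i (k : Int) fuel = ((pvKstar p (p.getD i 'a') k : Nat) : Int) := by
  intro k
  induction k using Nat.strong_induction_on with
  | _ k ih =>
    intro hk fuel hfuel
    have hkl : k < p.length := lt_trans hk hi
    have hguard : (0 < (k : Int) ∧ PySem.List.pyGet? p (k : Int) ≠ PySem.List.pyGet? p (i : Int)) ↔
        (0 < k ∧ p.getD k 'a' ≠ p.getD i 'a') := by
      rw [PySem.List.pyGet?_natCast, PySem.List.pyGet?_natCast,
        List.getElem?_eq_getElem hkl, List.getElem?_eq_getElem hi,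
        List.getD_eq_getElem p 'a' hkl, List.getD_eq_getElem p 'a' hi]
      constructor
      · rintro ⟨h1, h2⟩
        exact ⟨by exact_mod_cast h1, by simpa using h2⟩
      · rintro ⟨h1, h2⟩
        exact ⟨by exact_mod_cast h1, by simpa using h2⟩
    match fuel, hfuel with
    | 0, hfuel =>
      have hk0 : k = 0 := by omega
      subst hk0
      rw [pvKstar]
      simp [borderWhile]
    | fuel+1, hfuel =>
      rw [borderWhile, pvKstar]
      by_cases h : 0 < k ∧ p.getD k 'a' ≠ p.getD i 'a'
      · rw [if_pos (hguard.mpr h), dif_pos h]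
        have hk1 : (k : Int) - 1 = ((k - 1 : Nat) : Int) := by omega
        have hidx : (pvPI p i)[k-1]? = some ((pvMb (p.take k) : Nat) : Int) := by
          have hki : k - 1 < i := by omega
          simp [pvPI, List.getElem?_map, List.getElem?_range hki, Nat.sub_add_cancel h.1]
        rw [hk1, PySem.List.pyGet?_natCast, hidx]
        have hmbk : pvMb (p.take k) < k := pvMb_take_lt p k h.1
        exact ih (pvMb (p.take k)) hmbk (lt_trans hmbk hk) fuel (by omega)
      · rw [if_neg (fun hg => h (hguard.mp hg)), dif_neg h]

theorem border_inv (p : List Char) (m : Nat) (hm : m ≤ p.length - 1) :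
    (List.range' 1 m).foldl (borderStep p) ([0], 0) =
      (pvPI p (m+1), (pvMb (p.take (m+1)) : Int)) := by
  induction m with
  | zero =>
    have h1 : pvMb (p.take 1) = 0 := by
      have := pvMb_le (p.take 1)
      have h2 : (p.take 1).length ≤ 1 := by simp
      omega
    simp [pvPI, List.range_one, h1]
  | succ m ih =>
    have hm' : m ≤ p.length - 1 := by omega
    have hlen : m + 1 < p.length := by
      rcases p with _ | ⟨c, t⟩
      · simp at hm
      · simp at hm ⊢; omega
    rw [List.range'_1_concat, List.foldl_concat, ih hm']
    have hadd : 1 + m = m + 1 := by omega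
    rw [hadd]
    unfold borderStep
    have hmb : pvMb (p.take (m+1)) < m + 1 := pvMb_take_lt p (m+1) (by omega)
    rw [borderWhile_eq p (m+1) hlen (pvMb (p.take (m+1))) hmb p.length (by omega)]
    have hK : pvKstar p (p.getD (m+1) 'a') (pvMb (p.take (m+1))) < m + 1 := by
      obtain ⟨h1, _, _, _⟩ := pvKstar_spec p (m+1) hlen (pvMb (p.take (m+1))) hmb (pvMb_isB _)
        (fun L hL hB _ => pvMb_max _ L (by simp; omega) hB.2)
      exact h1
    have hKl : pvKstar p (p.getD (m+1) 'a') (pvMb (p.take (m+1))) < p.length := by omega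
    have hcond : (PySem.List.pyGet? p ((pvKstar p (p.getD (m+1) 'a') (pvMb (p.take (m+1))) : Nat) : Int) =
        PySem.List.pyGet? p ((m+1 : Nat) : Int)) ↔
        (p.getD (pvKstar p (p.getD (m+1) 'a') (pvMb (p.take (m+1)))) 'a' = p.getD (m+1) 'a') :=
      pv_pyGet_eq_iff p _ (m+1) hKl hlen
    have hPI : pvPI p (m+1+1) = pvPI p (m+1) ++ [(pvMb (p.take (m+1+1)) : Int)] := by
      unfold pvPI
      rw [List.range_succ]
      simp
    rw [hPI, pvMb_succ p (m+1) hlen (by omega)]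
    by_cases hc : p.getD (pvKstar p (p.getD (m+1) 'a') (pvMb (p.take (m+1)))) 'a' = p.getD (m+1) 'a'
    · rw [if_pos (hcond.mpr hc), if_pos hc]
      simp
    · rw [if_neg (fun hg => hc (hcond.mp hg)), if_neg hc]

theorem border_eq (p : List Char) (hp : p ≠ []) : border p = pvPI p p.length := by
  unfold border
  have h1 : 1 ≤ p.length := by
    rcases p with _ | _
    · simp at hp
    · simp
  rw [border_inv p (p.length - 1) (le_refl _)]
  have h2 : p.length - 1 + 1 = p.length := by omega
  rw [h2]

theorem fbWhile_eq (l : List Char) (n : Nat) (hn : n + 1 = l.length) :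
    ∀ (i : Nat), i ≤ n → ∀ (last : Int) (fuel : Nat), i ≤ fuel →
    fbWhile l ((List.range n).map (fun j => (pvMb (l.take (j+1)) : Int))) (n : Int) (i : Int) last fuel =
      pvFold l n (pvVisits l i) last := by
  intro i
  induction i using Nat.strong_induction_on with
  | _ i ih =>
    intro hi last fuel hfuel
    by_cases h0 : 0 < i
    · obtain ⟨fuel', rfl⟩ : ∃ f', fuel = f' + 1 := ⟨fuel - 1, by omega⟩
      · rw [fbWhile, if_pos (by exact_mod_cast h0)]
        have hn1 : 0 < n := by omega
        have hnl : n < l.length := by omega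
        have hi1 : (i : Int) - 1 = ((i - 1 : Nat) : Int) := by omega
        have hidx : ((List.range n).map (fun j => (pvMb (l.take (j+1)) : Int)))[i-1]? =
            some ((pvMb (l.take i) : Nat) : Int) := by
          have h1 : i - 1 < n := by omega
          simp [List.getElem?_map, List.getElem?_range h1, Nat.sub_add_cancel h0]
        rw [hi1, PySem.List.pyGet?_natCast, hidx]
        have hmb : pvMb (l.take i) < i := pvMb_take_lt l i h0
        have hmbl : pvMb (l.take i) < l.length := by omega
        have hcond : ((PySem.List.pyGet? l ((pvMb (l.take i) : Nat) : Int)).getD 'a' <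
            (PySem.List.pyGet? l (n : Int)).getD 'a') ↔
            (l.getD (pvMb (l.take i)) 'a' < l.getD n 'a') := by
          rw [PySem.List.pyGet?_natCast, PySem.List.pyGet?_natCast,
            List.getElem?_eq_getElem hmbl, List.getElem?_eq_getElem hnl,
            List.getD_eq_getElem l 'a' hmbl, List.getD_eq_getElem l 'a' hnl]
          simp
        rw [pvVisits, dif_pos h0]
        unfold pvFold
        rw [List.foldl_cons]
        simp only [Option.getD_some]
        rw [ih (pvMb (l.take i)) hmb (by omega) _ fuel' (by omega)]
        unfold pvFold
        by_cases hc : l.getD (pvMb (l.take i)) 'a' < l.getD n 'a'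
        · rw [if_pos (hcond.mpr hc), if_pos hc]
        · rw [if_neg (fun hg => hc (hcond.mp hg)), if_neg hc]
    · have hiz : i = 0 := by omega
      subst hiz
      rw [pvVisits]
      simp only [dif_neg h0]
      unfold pvFold
      rw [List.foldl_nil]
      match fuel with
      | 0 => rfl
      | fuel+1 =>
        rw [show ((0 : Nat) : Int) = 0 by rfl, fbWhile]
        simp

theorem pv_border_iff (l : List Char) (n L : Nat) (hn : n ≤ l.length) (hL : L ≤ n) :
    (l.take L = (l.drop (n-L)).take L) ↔ (l.take n).take L <:+ l.take n := by
  have h1 : (l.take n).take L = l.take L := by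
    rw [List.take_take, Nat.min_eq_left hL]
  have h2 : (l.take n).drop (n - L) = (l.drop (n-L)).take L := by
    rw [List.drop_take]
    congr 1
    omega
  rw [List.suffix_iff_eq_drop, h1]
  have h3 : (l.take L).length = L := by simp; omega
  have h4 : (l.take n).length = n := by simp; omega
  rw [h3, h4, h2]

theorem visits_eq_filter (l : List Char) (n : Nat) (hn : n ≤ l.length) :
    pvVisits l n = ((List.range n).reverse).filter (fun L => decide ((l.take n).take L <:+ l.take n)) := by
  have hlen : (l.take n).length = n := by simp; omega
  have hnd1 : (pvVisits l n).Nodup := (pvVisits_pairwise l n hn).imp (fun h => by omega)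
  have hnd2 : (((List.range n).reverse).filter (fun L => decide ((l.take n).take L <:+ l.take n))).Nodup :=
    List.Nodup.filter _ (List.nodup_reverse.mpr (List.nodup_range (n := n)))
  have hmem : ∀ x, x ∈ pvVisits l n ↔
      x ∈ ((List.range n).reverse).filter (fun L => decide ((l.take n).take L <:+ l.take n)) := by
    intro x
    rw [pv_mem_visits l n hn x, List.mem_filter, List.mem_reverse, List.mem_range]
    unfold pvIsB
    constructor
    · rintro ⟨h1, _, h2⟩
      exact ⟨h1, by simpa using h2⟩
    · rintro ⟨h1, h2⟩
      exact ⟨h1, by omega, by simpa using h2⟩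
  have hperm : List.Perm (pvVisits l n) (((List.range n).reverse).filter (fun L => decide ((l.take n).take L <:+ l.take n))) :=
    (List.perm_ext_iff_of_nodup hnd1 hnd2).mpr hmem
  have hp2 : (((List.range n).reverse).filter (fun L => decide ((l.take n).take L <:+ l.take n))).Pairwise (· > ·) := by
    apply List.Pairwise.filter
    apply List.pairwise_reverse.mpr
    exact (List.pairwise_lt_range (n := n)).imp (fun h => by omega)
  exact List.Perm.eq_of_pairwise (fun a b _ _ h1 h2 => by omega) (pvVisits_pairwise l n hn) hp2 hperm

-- ===== VERDICT (by name: the statement is the Claim_ definition above) =====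
theorem find_bre_spec : Claim_equal_find_bre := by
  intro pp _ hpre
  unfold Spec_find_bre find_bre find_bre_alt
  by_cases hg : pp.2 = "" ∧ PySem.Chars.find pp.1.toList [Char.ofNat 200] ≥ 0
  · simp only [if_pos hg]
  · simp only [if_neg hg]
    have hl : pp.1.toList ≠ [] := fun hc => hpre (String.toList_eq_nil_iff.mp hc)
    set l := pp.1.toList with hldef
    have hN : 1 ≤ l.length := List.length_pos_iff.mpr hl
    set n : Nat := l.length - 1 with hndef
    have hcast : (l.length : Int) - 1 = (n : Int) := by rw [hndef]; omega
    rw [hcast]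
    rcases Nat.eq_zero_or_pos n with hn0 | hn1
    · -- w has length 1: both loops are empty and last = 0
      have hlen1 : l.length = 1 := by omega
      obtain ⟨c, hc⟩ := List.length_eq_one_iff.mp hlen1
      rw [hn0, hc]
      norm_num [border, fbWhile, PySem.List.slice_to, PySem.List.slice_to_natCast, PySem.List.pyGet?_neg_one,
        PySem.List.pyRange_neg_one_eq_nil]
    · -- the general case: both sides compute pvFold over the border chain of w[:n]
      have hnl : n + 1 = l.length := by omega
      rw [PySem.List.slice_to_natCast]
      have htlen : (l.take n).length = n := by simp; omega
      have htne : l.take n ≠ [] := by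
        intro hc
        rw [hc] at htlen
        simp at htlen
        omega
      have hb : border (l.take n) = (List.range n).map (fun j => (pvMb (l.take (j+1)) : Int)) := by
        rw [border_eq _ htne, htlen]
        unfold pvPI
        apply List.map_congr_left
        intro j hj
        have hj' : j + 1 ≤ n := by
          simp [List.mem_range] at hj
          omega
        rw [List.take_take, Nat.min_eq_left hj']
      rw [hb]
      have hlast0 : (PySem.List.pyGet? ((List.range n).map (fun j => (pvMb (l.take (j+1)) : Int)))
          ((n : Int) - 1)).getD 0 = ((pvMb (l.take n) : Nat) : Int) := by
        have h1 : (n : Int) - 1 = ((n - 1 : Nat) : Int) := by omega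
        have h2 : n - 1 < n := by omega
        rw [h1, PySem.List.pyGet?_natCast]
        simp [List.getElem?_map, List.getElem?_range h2, Nat.sub_add_cancel hn1]
      rw [hlast0, fbWhile_eq l n hnl n (le_refl n) _ l.length (by omega)]
      have hrange : PySem.List.pyRange ((n : Int) - 1) (-1) (-1) =
          ((List.range n).reverse).map (fun k : Nat => (k : Int)) := by
        rw [PySem.List.pyRange_neg_one_eq_reverse]
        have h2 : (n : Int) - 1 + 1 = (n : Int) := by ring
        have h1 : (-1 : Int) + 1 = 0 := by ring
        rw [h1, h2, PySem.List.pyRange_one]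
        simp
      rw [hrange, List.filter_map]
      have hfc : List.filter ((fun L => PySem.List.slice l none (some L) ==
            PySem.List.slice l (some ((n : Int) - L)) (some (n : Int))) ∘ (fun k : Nat => (k : Int)))
            ((List.range n).reverse)
          = List.filter (fun L => decide ((l.take n).take L <:+ l.take n)) ((List.range n).reverse) := by
        apply List.filter_congr
        intro x hx
        have hxn : x < n := by
          simp [List.mem_reverse, List.mem_range] at hx
          exact hx
        simp only [Function.comp]
        rw [PySem.List.slice_to_natCast]
        have h1 : (n : Int) - (x : Int) = ((n - x : Nat) : Int) := by omega
        rw [h1, PySem.List.slice_natCast]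
        have h2 : n - (n - x) = x := by omega
        rw [h2, Bool.eq_iff_iff]
        simp only [beq_iff_eq, decide_eq_true_eq]
        exact pv_border_iff l n x (by omega) (by omega)
      rw [hfc, ← visits_eq_filter l n (by omega)]
      have hhead : (((pvVisits l n).map (fun k : Nat => (k : Int))).head?).getD 0 =
          ((pvMb (l.take n) : Nat) : Int) := by
        rw [pvVisits, dif_pos hn1]
        simp
      rw [hhead]
      have hfold : pvFold l n (pvVisits l n) ((pvMb (l.take n) : Nat) : Int) =
          ((pvVisits l n).map (fun k : Nat => (k : Int))).foldl
            (fun last L => if (PySem.List.pyGet? l L).getD 'a' < (PySem.List.pyGet? l (n : Int)).getD 'a'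
              then L else last) ((pvMb (l.take n) : Nat) : Int) := by
        rw [List.foldl_map]
        unfold pvFold
        apply PySem.List.foldl_congr_mem
        intro acc x hx
        have hxb := (pv_mem_visits l n (by omega) x).mp hx
        have hxl : x < l.length := by omega
        have hnl' : n < l.length := by omega
        simp only [PySem.List.pyGet?_natCast, List.getElem?_eq_getElem hxl,
          List.getElem?_eq_getElem hnl', Option.getD_some,
          List.getD_eq_getElem l 'a' hxl, List.getD_eq_getElem l 'a' hnl']
      rw [hfold]
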